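-- pv_equiv track=rewrite | github.com/Areeba-Shafqat/file_system_monitoring-Bronze_tier- | task_analyzer.py | identify_file_type
-- ===== SOURCE A (Python) =====
-- def identify_file_type(content):
--     """Identify the type of file/task"""
--     content_lower = content.lower()
--
--     if any(keyword in content_lower for keyword in ['invoice', 'payment', 'bill']):
--         return "payment_request"
--     elif any(keyword in content_lower for keyword in ['email', 'reply', 'message']):
--         return "communication"
--     elif any(keyword in content_lower for keyword in ['report', 'summary', 'analysis']):
--         return "report"
--     else:
--         return "file_drop"
-- ===== SOURCE B (Python) =====
-- KEYWORD_PRIORITY = {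
--     'invoice': 0, 'payment': 0, 'bill': 0,
--     'email': 1, 'reply': 1, 'message': 1,
--     'report': 2, 'summary': 2, 'analysis': 2,
-- }
-- LABELS = ['payment_request', 'communication', 'report', 'file_drop']
--
-- def identify_file_type(content):
--     cl = content.lower()
--     best = 3
--     for kw, prio in KEYWORD_PRIORITY.items():
--         if kw in cl:
--             best = min(best, prio)
--     return LABELS[best]
-- ===== Notes on version B (the rewrite author's own statement) =====
-- stated objective: alternative
-- what changed: Replaced the ordered short-circuiting if/elif category checks with an exhaustive scoring pass: every keyword carries a priority number, one loop accumulates the minimum priority of all matching keywords, and the label is read out of an array by that index.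
import Mathlib
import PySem

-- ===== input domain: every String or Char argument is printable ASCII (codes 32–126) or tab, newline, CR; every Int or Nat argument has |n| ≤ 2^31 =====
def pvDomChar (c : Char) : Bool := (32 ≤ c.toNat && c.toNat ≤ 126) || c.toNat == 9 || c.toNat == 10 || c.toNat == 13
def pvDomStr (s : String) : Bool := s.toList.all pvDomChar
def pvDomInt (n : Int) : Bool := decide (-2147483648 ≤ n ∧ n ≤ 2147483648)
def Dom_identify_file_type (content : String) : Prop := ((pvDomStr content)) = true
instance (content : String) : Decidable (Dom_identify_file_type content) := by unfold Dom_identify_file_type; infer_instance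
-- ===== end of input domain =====

-- B replaces the ordered if/elif category checks with an exhaustive min-priority scoring
-- pass over all keywords plus a label-array lookup (alternative decomposition; same cost).
-- ===== PORT A =====
def identify_file_type (content : String) : String :=
  let content_lower := PySem.Str.lower content
  if ["invoice", "payment", "bill"].any (fun keyword => PySem.Str.isIn keyword content_lower) then
    "payment_request"
  else if ["email", "reply", "message"].any (fun keyword => PySem.Str.isIn keyword content_lower) then
    "communication"
  else if ["report", "summary", "analysis"].any (fun keyword => PySem.Str.isIn keyword content_lower) then
    "report"
  else
    "file_drop"

-- ===== PORT B =====
def pvKeywordPriority : List (String × Nat) :=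
  [("invoice", 0), ("payment", 0), ("bill", 0),
   ("email", 1), ("reply", 1), ("message", 1),
   ("report", 2), ("summary", 2), ("analysis", 2)]

def pvLabels : List String := ["payment_request", "communication", "report", "file_drop"]

def identify_file_type_alt (content : String) : String :=
  let cl := PySem.Str.lower content
  let best := pvKeywordPriority.foldl
    (fun best kp => if PySem.Str.isIn kp.1 cl then min best kp.2 else best) 3
  pvLabels.getD best "file_drop"

-- ===== PRECONDITION & SPEC =====
def Spec_identify_file_type (content : String) (out : String) : Prop := out = identify_file_type_alt content
instance (content : String) (out : String) : Decidable (Spec_identify_file_type content out) := by unfold Spec_identify_file_type; infer_instance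

-- ===== CLAIM (what is proved, stated in full; the proofs are below) =====
def Claim_equal_identify_file_type : Prop := ∀ (content : String), Dom_identify_file_type content → Spec_identify_file_type content (identify_file_type content)

-- ===== LEMMAS AND PROOFS =====

-- ===== VERDICT (by name: the statement is the Claim_ definition above) =====
theorem identify_file_type_spec : Claim_equal_identify_file_type := by
  intro content _
  unfold Spec_identify_file_type identify_file_type identify_file_type_alt pvKeywordPriority pvLabels
  simp only [List.any_cons, List.any_nil, Bool.or_false, List.foldl]
  generalize PySem.Str.isIn "invoice" (PySem.Str.lower content) = b1
  generalize PySem.Str.isIn "payment" (PySem.Str.lower content) = b2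
  generalize PySem.Str.isIn "bill" (PySem.Str.lower content) = b3
  generalize PySem.Str.isIn "email" (PySem.Str.lower content) = b4
  generalize PySem.Str.isIn "reply" (PySem.Str.lower content) = b5
  generalize PySem.Str.isIn "message" (PySem.Str.lower content) = b6
  generalize PySem.Str.isIn "report" (PySem.Str.lower content) = b7
  generalize PySem.Str.isIn "summary" (PySem.Str.lower content) = b8
  generalize PySem.Str.isIn "analysis" (PySem.Str.lower content) = b9
  revert b1 b2 b3 b4 b5 b6 b7 b8 b9
  decide
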